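-- pv_equiv track=rewrite | github.com/arvidede/advent-of-code | solutions/2021/19/solution.py | get_adjacent_scanners
-- ===== SOURCE A (Python) =====
-- d = lambda p1, p2: sum((a - b) ** 2 for a, b in zip(p1, p2))
--
-- def generate_distance_scanner_map(scanners):
--     beacon_distances = {}
--     for scanner, beacons in enumerate(scanners):
--         for i, p1 in enumerate(beacons):
--             for p2 in beacons[i:]:
--                 beacon_distance = d(p1, p2)
--                 if beacon_distance in beacon_distances:
--                     beacon_distances[beacon_distance].add(scanner)
--                 elif beacon_distance > 0:
--                     beacon_distances[beacon_distance] = set([scanner])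
--     return [
--         scanners for scanners in beacon_distances.values() if len(scanners) > 1
--     ]
--
-- def get_adjacent_scanners(scanners):
--     distance_map = generate_distance_scanner_map(scanners)
--     adjacent_scanners = {}
--
--     for scanner in range(len(scanners)):
--         neighbors = {}
--         for connection in distance_map:
--             if scanner in connection:
--                 for neighbor in connection:
--                     if neighbor == scanner:
--                         continue
--                     if neighbor in neighbors:
--                         neighbors[neighbor] += 1
--                         continue
--                     neighbors[neighbor] = 1
--
--         adjacent_scanners[scanner] = [
--             neighbor
--             for neighbor, num_common in neighbors.items()
--             if num_common >= 66  # 12 choose 2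
--         ]
--     return adjacent_scanners
-- ===== SOURCE B (Python) =====
-- d = lambda p1, p2: sum((a - b) ** 2 for a, b in zip(p1, p2))
--
-- def get_adjacent_scanners(scanners):
--     # distance -> set of scanners that realise it
--     beacon_distances = {}
--     for scanner, beacons in enumerate(scanners):
--         for i, p1 in enumerate(beacons):
--             for p2 in beacons[i + 1:]:
--                 dist = d(p1, p2)
--                 if dist > 0:
--                     beacon_distances.setdefault(dist, set()).add(scanner)
--     # one pass over the shared-distance groups, accumulating co-occurrence
--     # counts for ALL scanners at once (dict of per-scanner counters)
--     counts = {}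
--     for conn in beacon_distances.values():
--         if len(conn) > 1:
--             for a in conn:
--                 ca = counts.setdefault(a, {})
--                 for b in conn:
--                     if b != a:
--                         ca[b] = ca.get(b, 0) + 1
--     return {
--         s: [n for n, c in counts.get(s, {}).items() if c >= 66]
--         for s in range(len(scanners))
--     }
-- ===== Notes on version B (the rewrite author's own statement) =====
-- stated objective: alternative
-- what changed: Instead of rescanning the whole distance map once per scanner to count shared distances, B makes a single pass over the shared-distance groups, accumulating per-scanner co-occurrence counters for all scanners at once in a dict of dicts (and builds the distance map with setdefault over j>i index pairs instead of if/elif over self-including tails).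
import Mathlib
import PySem

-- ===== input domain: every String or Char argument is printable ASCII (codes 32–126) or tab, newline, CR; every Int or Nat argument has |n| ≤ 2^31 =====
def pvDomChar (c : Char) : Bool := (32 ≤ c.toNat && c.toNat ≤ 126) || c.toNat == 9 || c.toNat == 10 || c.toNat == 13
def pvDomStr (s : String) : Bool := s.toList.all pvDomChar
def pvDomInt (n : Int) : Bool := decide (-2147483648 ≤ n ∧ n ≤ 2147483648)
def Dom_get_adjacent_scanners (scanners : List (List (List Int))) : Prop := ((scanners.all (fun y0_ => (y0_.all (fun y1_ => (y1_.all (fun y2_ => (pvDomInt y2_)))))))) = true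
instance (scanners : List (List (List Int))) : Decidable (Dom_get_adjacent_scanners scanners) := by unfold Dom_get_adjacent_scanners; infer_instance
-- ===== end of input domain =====

-- B replaces A's per-scanner rescans of the distance map by ONE pass that accumulates
-- co-occurrence counters for all scanners at once (objective: alternative algorithm, same measured cost).
-- Python set iteration is modelled as first-insertion order (here: ascending scanner index).

-- ===== PORT A =====

-- d = lambda p1, p2: sum((a - b) ** 2 for a, b in zip(p1, p2))   (shared by Source A and Source B)
def pvD (p1 p2 : List Int) : Int := ((p1.zip p2).map (fun ab => (ab.1 - ab.2) ^ 2)).sum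

-- body of the innermost loop of generate_distance_scanner_map
def pvStepA (scanner : Int) (bd : PySem.Dict Int (PySem.Set Int)) (p1 p2 : List Int) :
    PySem.Dict Int (PySem.Set Int) :=
  let beacon_distance := pvD p1 p2
  match bd.get? beacon_distance with
  | some s => bd.insert beacon_distance (PySem.Set.add s scanner)    -- in-place set.add
  | none =>
    if beacon_distance > 0 then bd.insert beacon_distance (PySem.Set.ofList [scanner]) else bd

def pvGenMap (scanners : List (List (List Int))) : List (PySem.Set Int) :=
  let bd : PySem.Dict Int (PySem.Set Int) :=
    (PySem.List.enumerate scanners).foldl (fun bd sb =>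
      (PySem.List.enumerate sb.2).foldl (fun bd ip =>
        (PySem.List.slice sb.2 (some ip.1) none).foldl (fun bd p2 => pvStepA sb.1 bd ip.2 p2) bd)
        bd)
      PySem.Dict.empty
  bd.values.filter (fun s => decide (1 < s.length))

-- body of 'for neighbor in connection: …' ('neighbors[neighbor] += 1' via get?, a dict lookup)
def pvNbA (scanner : Int) (nb : PySem.Dict Int Int) (neighbor : Int) : PySem.Dict Int Int :=
  if neighbor == scanner then nb
  else
    match nb.get? neighbor with
    | some c => nb.insert neighbor (c + 1)
    | none => nb.insert neighbor 1

def get_adjacent_scanners (scanners : List (List (List Int))) : List (Int × List Int) :=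
  let distance_map := pvGenMap scanners
  ((PySem.List.pyRange 0 (scanners.length : Int) 1).foldl (fun adj scanner =>
      let neighbors : PySem.Dict Int Int :=
        distance_map.foldl (fun nb conn =>
          if PySem.Set.contains conn scanner then conn.foldl (pvNbA scanner) nb else nb)
          PySem.Dict.empty
      adj.insert scanner
        ((neighbors.items.filter (fun kv => decide (66 ≤ kv.2))).map Prod.fst))
    PySem.Dict.empty).items

-- ===== PORT B =====

-- 'beacon_distances.setdefault(dist, set()).add(scanner)' mutates the stored set:
-- net effect = overwrite-in-place/append of the extended set (Dict.insert does exactly that).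
def pvStepB (scanner : Int) (bd : PySem.Dict Int (PySem.Set Int)) (p1 p2 : List Int) :
    PySem.Dict Int (PySem.Set Int) :=
  let dist := pvD p1 p2
  if dist > 0 then bd.insert dist (PySem.Set.add (bd.getD dist PySem.Set.empty) scanner) else bd

-- 'ca[b] = ca.get(b, 0) + 1'
def pvCnt (a : Int) (ca : PySem.Dict Int Int) (b : Int) : PySem.Dict Int Int :=
  if b != a then ca.insert b (ca.getD b 0 + 1) else ca

-- 'ca = counts.setdefault(a, {})' then the inner loop mutates ca in place: net effect =
-- counts carries key a (appended if fresh, position kept otherwise) bound to the mutated dict.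
def pvCounts (dm : List (PySem.Set Int)) : PySem.Dict Int (PySem.Dict Int Int) :=
  dm.foldl (fun counts conn =>
    if decide (1 < conn.length) then
      conn.foldl (fun counts a =>
        counts.insert a (conn.foldl (pvCnt a) (counts.getD a PySem.Dict.empty))) counts
    else counts) PySem.Dict.empty

def get_adjacent_scanners_alt (scanners : List (List (List Int))) : List (Int × List Int) :=
  let beacon_distances : PySem.Dict Int (PySem.Set Int) :=
    (PySem.List.enumerate scanners).foldl (fun bd sb =>
      (PySem.List.enumerate sb.2).foldl (fun bd ip =>
        (PySem.List.slice sb.2 (some (ip.1 + 1)) none).foldl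
          (fun bd p2 => pvStepB sb.1 bd ip.2 p2) bd)
        bd)
      PySem.Dict.empty
  let counts := pvCounts beacon_distances.values
  ((PySem.List.pyRange 0 (scanners.length : Int) 1).foldl (fun d s =>
      d.insert s
        (((counts.getD s PySem.Dict.empty).items.filter (fun kv => decide (66 ≤ kv.2))).map
          Prod.fst))
    PySem.Dict.empty).items

-- ===== PRECONDITION & SPEC =====
def Spec_get_adjacent_scanners (scanners : List (List (List Int))) (out : List (Int × List Int)) : Prop := out = get_adjacent_scanners_alt scanners
instance (scanners : List (List (List Int))) (out : List (Int × List Int)) : Decidable (Spec_get_adjacent_scanners scanners out) := by unfold Spec_get_adjacent_scanners; infer_instance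

-- ===== CLAIM (what is proved, stated in full; the proofs are below) =====
def Claim_equal_get_adjacent_scanners : Prop := ∀ (scanners : List (List (List Int))), Dom_get_adjacent_scanners scanners → Spec_get_adjacent_scanners scanners (get_adjacent_scanners scanners)

-- ===== LEMMAS AND PROOFS =====

-- invariant of the beacon_distances dict: no key 0, every stored set is duplicate-free
def pvInv (bd : PySem.Dict Int (PySem.Set Int)) : Prop :=
  bd.get? 0 = none ∧ ∀ v ∈ bd.values, List.Nodup v

theorem pvD_nonneg (p1 p2 : List Int) : 0 ≤ pvD p1 p2 := by
  apply List.sum_nonneg; intro x hx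
  simp only [List.mem_map] at hx
  obtain ⟨ab, _, rfl⟩ := hx; positivity
theorem pvD_self (p : List Int) : pvD p p = 0 := by
  induction p with
  | nil => rfl
  | cons a t ih => simpa [pvD, List.zip_cons_cons] using ih


theorem pvStep_eq (scanner : Int) (bd : PySem.Dict Int (PySem.Set Int)) (p1 p2 : List Int)
    (h : pvInv bd) :
    pvStepA scanner bd p1 p2 = pvStepB scanner bd p1 p2 ∧ pvInv (pvStepB scanner bd p1 p2) := by
  obtain ⟨h0, hv⟩ := h
  have hnn := pvD_nonneg p1 p2
  cases hg : bd.get? (pvD p1 p2) with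
  | none =>
    by_cases hpos : pvD p1 p2 > 0
    · simp only [pvStepA, pvStepB, pvInv, hg, if_pos hpos,
        PySem.Dict.getD_of_get?_eq_none bd PySem.Set.empty hg]
      refine ⟨by rfl, ?_, ?_⟩
      · rw [PySem.Dict.get?_insert_of_ne _ _ (by omega)]; exact h0
      · intro v hvmem
        rcases PySem.Dict.mem_values_insert _ _ _ _ hvmem with rfl | hold
        · exact PySem.Set.nodup_add _ _ List.nodup_nil
        · exact hv v hold
    · simp only [pvStepA, pvStepB, pvInv, hg, if_neg hpos]
      exact ⟨trivial, h0, hv⟩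
  | some s =>
    have hne : pvD p1 p2 ≠ 0 := by intro hz; rw [hz, h0] at hg; cases hg
    have hpos : pvD p1 p2 > 0 := by omega
    have hsnd : s ∈ bd.values := by
      have := PySem.Dict.mem_items_of_get?_eq_some _ hg
      simp only [PySem.Dict.values]
      exact List.mem_map_of_mem this
    simp only [pvStepA, pvStepB, pvInv, hg, if_pos hpos,
      PySem.Dict.getD_of_get?_eq_some bd PySem.Set.empty hg]
    refine ⟨by first | rfl | trivial, ?_, ?_⟩
    · rw [PySem.Dict.get?_insert_of_ne _ _ (by omega)]; exact h0
    · intro v hvmem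
      rcases PySem.Dict.mem_values_insert _ _ _ _ hvmem with rfl | hold
      · exact PySem.Set.nodup_add _ _ (hv s hsnd)
      · exact hv v hold
theorem pvStepA_self (scanner : Int) (bd : PySem.Dict Int (PySem.Set Int)) (p : List Int)
    (h : pvInv bd) : pvStepA scanner bd p p = bd := by
  simp [pvStepA, pvD_self, h.1]
theorem pvFoldStep_eq (scanner : Int) (p1 : List Int) (l : List (List Int))
    (bd : PySem.Dict Int (PySem.Set Int)) (h : pvInv bd) :
    l.foldl (fun bd p2 => pvStepA scanner bd p1 p2) bd
      = l.foldl (fun bd p2 => pvStepB scanner bd p1 p2) bd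
    ∧ pvInv (l.foldl (fun bd p2 => pvStepB scanner bd p1 p2) bd) := by
  induction l generalizing bd with
  | nil => exact ⟨rfl, h⟩
  | cons p2 t ih =>
    obtain ⟨heq, hinv⟩ := pvStep_eq scanner bd p1 p2 h
    simp only [List.foldl_cons, heq]
    exact ih _ hinv

theorem pvInner_eq (scanner : Int) (full : List (List Int)) (bs : List (List Int)) (k : Nat)
    (hdrop : full.drop k = bs) (bd : PySem.Dict Int (PySem.Set Int)) (h : pvInv bd) :
    (PySem.List.enumerate bs (k : Int)).foldl (fun bd ip =>
        (PySem.List.slice full (some ip.1) none).foldl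
          (fun bd p2 => pvStepA scanner bd ip.2 p2) bd) bd
      = (PySem.List.enumerate bs (k : Int)).foldl (fun bd ip =>
        (PySem.List.slice full (some (ip.1 + 1)) none).foldl
          (fun bd p2 => pvStepB scanner bd ip.2 p2) bd) bd
    ∧ pvInv ((PySem.List.enumerate bs (k : Int)).foldl (fun bd ip =>
        (PySem.List.slice full (some (ip.1 + 1)) none).foldl
          (fun bd p2 => pvStepB scanner bd ip.2 p2) bd) bd) := by
  induction bs generalizing k bd with
  | nil => simp only [PySem.List.enumerate_nil, List.foldl_nil]; exact ⟨trivial, h⟩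
  | cons b t ih =>
    have hdrop' : full.drop (k + 1) = t := by
      rw [← List.drop_drop, hdrop]; rfl
    have hcast : (k : Int) + 1 = ((k + 1 : Nat) : Int) := by push_cast; ring
    rw [PySem.List.enumerate_cons]
    simp only [List.foldl_cons]
    have hsk : PySem.List.slice full (some (k : Int)) none = b :: t := by
      rw [PySem.List.slice_from_natCast, hdrop]
    have hsk1 : PySem.List.slice full (some ((k : Int) + 1)) none = t := by
      rw [hcast, PySem.List.slice_from_natCast, hdrop']
    rw [hsk, hsk1]
    simp only [List.foldl_cons]
    rw [pvStepA_self scanner bd b h]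
    obtain ⟨heq, hinv⟩ := pvFoldStep_eq scanner b t bd h
    rw [heq]
    have := ih (k + 1) hdrop' _ hinv
    rw [hcast]
    exact this
theorem pvBD_eq (ss : List (List (List Int))) (k : Int) (bd : PySem.Dict Int (PySem.Set Int))
    (h : pvInv bd) :
    (PySem.List.enumerate ss k).foldl (fun bd sb =>
        (PySem.List.enumerate sb.2).foldl (fun bd ip =>
          (PySem.List.slice sb.2 (some ip.1) none).foldl
            (fun bd p2 => pvStepA sb.1 bd ip.2 p2) bd) bd) bd
      = (PySem.List.enumerate ss k).foldl (fun bd sb =>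
        (PySem.List.enumerate sb.2).foldl (fun bd ip =>
          (PySem.List.slice sb.2 (some (ip.1 + 1)) none).foldl
            (fun bd p2 => pvStepB sb.1 bd ip.2 p2) bd) bd) bd
    ∧ pvInv ((PySem.List.enumerate ss k).foldl (fun bd sb =>
        (PySem.List.enumerate sb.2).foldl (fun bd ip =>
          (PySem.List.slice sb.2 (some (ip.1 + 1)) none).foldl
            (fun bd p2 => pvStepB sb.1 bd ip.2 p2) bd) bd) bd) := by
  induction ss generalizing k bd with
  | nil => simp only [PySem.List.enumerate_nil, List.foldl_nil]; exact ⟨trivial, h⟩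
  | cons sc t ih =>
    rw [PySem.List.enumerate_cons]
    simp only [List.foldl_cons]
    obtain ⟨heq, hinv⟩ := pvInner_eq k sc sc 0 rfl bd h
    rw [Int.natCast_zero] at heq hinv
    rw [heq]
    exact ih (k + 1) _ hinv
theorem pvNbA_eq_pvCnt (s : Int) (nb : PySem.Dict Int Int) (x : Int) :
    pvNbA s nb x = pvCnt s nb x := by
  unfold pvNbA pvCnt
  by_cases hx : x = s
  · simp [hx]
  · simp only [bne_iff_ne, ne_eq, hx, not_false_eq_true, if_true, beq_iff_eq]
    cases hg : nb.get? x with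
    | some c => rw [PySem.Dict.getD_of_get?_eq_some nb 0 hg]; simp
    | none => rw [PySem.Dict.getD_of_get?_eq_none nb 0 hg]; simp

theorem pvConnFold_getD (conn : PySem.Set Int) (l : List Int) (hnd : l.Nodup)
    (cts : PySem.Dict Int (PySem.Dict Int Int)) (s : Int) :
    (l.foldl (fun c a => c.insert a (conn.foldl (pvCnt a) (c.getD a PySem.Dict.empty))) cts).getD
        s PySem.Dict.empty
      = if s ∈ l then conn.foldl (pvCnt s) (cts.getD s PySem.Dict.empty)
        else cts.getD s PySem.Dict.empty := by
  induction l generalizing cts with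
  | nil => simp
  | cons a t ih =>
    simp only [List.foldl_cons, List.mem_cons]
    rcases List.nodup_cons.mp hnd with ⟨hna, hndt⟩
    by_cases hs : s = a
    · subst hs
      rw [ih hndt, if_neg hna, PySem.Dict.getD_insert, if_pos rfl, if_pos (Or.inl rfl)]
    · rw [ih hndt, PySem.Dict.getD_insert, if_neg hs]
      by_cases hst : s ∈ t
      · rw [if_pos hst, if_pos (Or.inr hst)]
      · rw [if_neg hst, if_neg (by tauto)]

theorem pvCounts_getD (l : List (PySem.Set Int)) (hnd : ∀ conn ∈ l, conn.Nodup)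
    (cts : PySem.Dict Int (PySem.Dict Int Int)) (s : Int) :
    (l.foldl (fun counts conn =>
        if decide (1 < conn.length) then
          conn.foldl (fun counts a =>
            counts.insert a (conn.foldl (pvCnt a) (counts.getD a PySem.Dict.empty))) counts
        else counts) cts).getD s PySem.Dict.empty
      = l.foldl (fun nb conn =>
          if decide (1 < conn.length) then
            (if PySem.Set.contains conn s then conn.foldl (pvCnt s) nb else nb)
          else nb) (cts.getD s PySem.Dict.empty) := by
  induction l generalizing cts with
  | nil => simp
  | cons conn t ih =>
    simp only [List.foldl_cons]
    have hc := hnd conn (List.mem_cons_self ..)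
    by_cases hlen : (1 : Nat) < conn.length
    · rw [if_pos (by simpa), if_pos (by simpa),
        ih (fun c hc' => hnd c (List.mem_cons_of_mem _ hc'))]
      congr 1
      rw [pvConnFold_getD conn conn hc cts s]
      by_cases hm : s ∈ conn
      · rw [if_pos hm, if_pos ((PySem.Set.contains_iff conn s).mpr hm)]
      · rw [if_neg hm, if_neg (by simp [hm])]
    · rw [if_neg (by simpa using hlen), if_neg (by simpa using hlen),
        ih (fun c hc' => hnd c (List.mem_cons_of_mem _ hc'))]

theorem pvInv_empty : pvInv (PySem.Dict.empty : PySem.Dict Int (PySem.Set Int)) := by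
  constructor
  · exact PySem.Dict.get?_empty 0
  · intro v hv
    simp [PySem.Dict.values, PySem.Dict.empty] at hv

-- ===== VERDICT (by name: the statement is the Claim_ definition above) =====
theorem get_adjacent_scanners_spec : Claim_equal_get_adjacent_scanners := by
  intro scanners _
  unfold Spec_get_adjacent_scanners
  obtain ⟨heq, hinv⟩ := pvBD_eq scanners 0 PySem.Dict.empty pvInv_empty
  simp only [get_adjacent_scanners, get_adjacent_scanners_alt, pvGenMap, pvCounts]
  rw [heq]
  set bd := (PySem.List.enumerate scanners 0).foldl (fun bd sb =>
      (PySem.List.enumerate sb.2 0).foldl (fun bd ip =>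
        (PySem.List.slice sb.2 (some (ip.1 + 1)) none).foldl
          (fun bd p2 => pvStepB sb.1 bd ip.2 p2) bd) bd) PySem.Dict.empty with hbd
  congr 1
  apply List.foldl_ext
  intro adj x _
  congr 1
  congr 1
  rw [List.foldl_filter]
  have hstep : (fun (nb : PySem.Dict Int Int) (conn : PySem.Set Int) =>
      if decide (1 < conn.length) then
        (if PySem.Set.contains conn x then conn.foldl (pvNbA x) nb else nb) else nb)
    = (fun (nb : PySem.Dict Int Int) (conn : PySem.Set Int) =>
      if decide (1 < conn.length) then
        (if PySem.Set.contains conn x then conn.foldl (pvCnt x) nb else nb) else nb) := by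
    funext nb conn
    have : pvNbA x = pvCnt x := funext fun nb => funext fun y => pvNbA_eq_pvCnt x nb y
    rw [this]
  rw [hstep]
  rw [pvCounts_getD bd.values hinv.2 PySem.Dict.empty x, PySem.Dict.getD_empty]
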